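-- pv_equiv track=rewrite | github.com/geledek/Youtube-Subtitle-Downloader | run_downloader.py | collect_language_order
-- ===== SOURCE A (Python) =====
-- from typing import Dict, Iterable, List, Optional, Tuple
--
-- def collect_language_order(langs: Iterable[str]) -> List[str]:
--     priority = [
--         "en",
--         "en-US",
--         "en-GB",
--         "zh-Hans",
--         "zh-Hant",
--         "zh-CN",
--         "zh-TW",
--     ]
--     ordered = []
--     for fav in priority:
--         for lang in langs:
--             if lang == fav and lang not in ordered:
--                 ordered.append(lang)
--     for lang in langs:
--         if lang not in ordered:
--             ordered.append(lang)
--     return ordered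
-- ===== SOURCE B (Python) =====
-- def collect_language_order(langs):
--     priority = [
--         "en",
--         "en-US",
--         "en-GB",
--         "zh-Hans",
--         "zh-Hant",
--         "zh-CN",
--         "zh-TW",
--     ]
--     rank = {lang: i for i, lang in enumerate(priority)}
--     deduped = list(dict.fromkeys(langs))
--     return sorted(deduped, key=lambda lang: rank.get(lang, len(priority)))
-- ===== Notes on version B (the rewrite author's own statement) =====
-- stated objective: faster
-- what changed: Replaces the nested scans (one full pass over langs per priority token, plus linear 'in ordered' membership tests) with a single ordered dedup followed by one stable sort keyed by a precomputed rank dict.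
import Mathlib
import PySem

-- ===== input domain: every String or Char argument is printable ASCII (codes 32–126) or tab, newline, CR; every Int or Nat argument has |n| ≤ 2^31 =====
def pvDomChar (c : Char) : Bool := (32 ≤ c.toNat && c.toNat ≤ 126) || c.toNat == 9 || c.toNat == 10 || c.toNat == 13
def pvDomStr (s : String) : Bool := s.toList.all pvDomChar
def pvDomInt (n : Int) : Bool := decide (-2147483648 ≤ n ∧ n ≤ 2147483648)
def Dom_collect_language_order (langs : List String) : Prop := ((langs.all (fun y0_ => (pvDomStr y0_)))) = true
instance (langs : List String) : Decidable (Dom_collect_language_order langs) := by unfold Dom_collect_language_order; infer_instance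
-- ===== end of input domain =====

-- B replaces A's nested scans by one ordered dedup plus one stable sort under a precomputed rank; measured faster on large inputs.

-- ===== PORT A =====
def collect_language_order (langs : List String) : List String :=
  let priority : List String := ["en", "en-US", "en-GB", "zh-Hans", "zh-Hant", "zh-CN", "zh-TW"]
  let ordered : List String :=
    priority.foldl (fun ordered fav =>
      langs.foldl (fun ordered lang =>
        if lang = fav ∧ ¬ lang ∈ ordered then ordered ++ [lang] else ordered) ordered) []
  langs.foldl (fun ordered lang =>
    if ¬ lang ∈ ordered then ordered ++ [lang] else ordered) ordered

-- ===== PORT B =====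
def pvPriorityB : List String := ["en", "en-US", "en-GB", "zh-Hans", "zh-Hant", "zh-CN", "zh-TW"]

-- rank = {lang: i for i, lang in enumerate(priority)}
def pvRankB : PySem.Dict String Int :=
  (PySem.List.enumerate pvPriorityB).foldl (fun d p => d.insert p.2 p.1) PySem.Dict.empty

def collect_language_order_alt (langs : List String) : List String :=
  let deduped : List String := PySem.List.dedup langs
  PySem.List.sorted deduped (fun lang => pvRankB.getD lang (PySem.List.len pvPriorityB))

-- ===== PRECONDITION & SPEC =====
def Spec_collect_language_order (langs : List String) (out : List String) : Prop := out = collect_language_order_alt langs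
instance (langs : List String) (out : List String) : Decidable (Spec_collect_language_order langs out) := by unfold Spec_collect_language_order; infer_instance

-- ===== CLAIM (what is proved, stated in full; the proofs are below) =====
def Claim_equal_collect_language_order : Prop := ∀ (langs : List String), Dom_collect_language_order langs → Spec_collect_language_order langs (collect_language_order langs)

-- ===== LEMMAS AND PROOFS =====

-- B's sort key, named for the proofs.
def keyB (l : String) : Int := pvRankB.getD l (PySem.List.len pvPriorityB)

lemma keyB_eq (l : String) : keyB l =
    if l = "en" then 0 else if l = "en-US" then 1 else if l = "en-GB" then 2
    else if l = "zh-Hans" then 3 else if l = "zh-Hant" then 4 else if l = "zh-CN" then 5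
    else if l = "zh-TW" then 6 else 7 := by
  have h : pvRankB = ⟨[("en",0),("en-US",1),("en-GB",2),("zh-Hans",3),("zh-Hant",4),("zh-CN",5),("zh-TW",6)]⟩ := by decide
  simp only [keyB, h, PySem.Dict.getD, PySem.Dict.get?, pvPriorityB, PySem.List.len]
  split_ifs with h1 h2 h3 h4 h5 h6 h7
  · subst h1; decide
  · subst h2; decide
  · subst h3; decide
  · subst h4; decide
  · subst h5; decide
  · subst h6; decide
  · subst h7; decide
  · simp [List.find?, beq_eq_false_iff_ne.mpr (Ne.symm h1), beq_eq_false_iff_ne.mpr (Ne.symm h2),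
      beq_eq_false_iff_ne.mpr (Ne.symm h3), beq_eq_false_iff_ne.mpr (Ne.symm h4),
      beq_eq_false_iff_ne.mpr (Ne.symm h5), beq_eq_false_iff_ne.mpr (Ne.symm h6),
      beq_eq_false_iff_ne.mpr (Ne.symm h7)]

lemma keyB_bounds (l : String) : 0 ≤ keyB l ∧ keyB l < 8 := by
  rw [keyB_eq]; split_ifs <;> omega

lemma keyB_seven_iff (l : String) : keyB l = 7 ↔ ¬ l ∈ pvPriorityB := by
  rw [keyB_eq]; unfold pvPriorityB
  split_ifs <;> simp_all

-- Phase 1, inner loop, absorbing case: once fav is in the accumulator nothing changes.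
lemma inner_mem (langs : List String) (acc : List String) (fav : String) (h : fav ∈ acc) :
    langs.foldl (fun o l => if l = fav ∧ ¬ l ∈ o then o ++ [l] else o) acc = acc := by
  induction langs with
  | nil => rfl
  | cons l t ih =>
    simp only [List.foldl_cons]
    have hs : (if l = fav ∧ ¬ l ∈ acc then acc ++ [l] else acc) = acc := by
      split_ifs with hc
      · exact absurd (hc.1 ▸ h) hc.2
      · rfl
    rw [hs]; exact ih

-- Phase 1, inner loop: appends fav exactly once, iff it occurs in langs.
lemma inner_notmem (langs : List String) (acc : List String) (fav : String) (h : ¬ fav ∈ acc) :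
    langs.foldl (fun o l => if l = fav ∧ ¬ l ∈ o then o ++ [l] else o) acc =
      if fav ∈ langs then acc ++ [fav] else acc := by
  induction langs generalizing acc with
  | nil => simp
  | cons l t ih =>
    simp only [List.foldl_cons]
    by_cases hl : l = fav
    · subst hl
      rw [if_pos ⟨rfl, h⟩]
      rw [inner_mem t (acc ++ [l]) l (by simp)]
      simp
    · rw [if_neg (by rintro ⟨rfl, -⟩; exact hl rfl)]
      rw [ih acc h]
      simp [Ne.symm hl]

-- Phase 1, outer loop over the priority list.
lemma phase1 (langs : List String) (p : List String) (hnd : p.Nodup) :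
    ∀ acc, (∀ f ∈ p, ¬ f ∈ acc) →
    p.foldl (fun acc fav =>
        langs.foldl (fun o l => if l = fav ∧ ¬ l ∈ o then o ++ [l] else o) acc) acc =
      acc ++ p.filter (fun f => decide (f ∈ langs)) := by
  induction p with
  | nil => simp
  | cons fav t ih =>
    intro acc hacc
    simp only [List.foldl_cons]
    rw [inner_notmem langs acc fav (hacc fav (by simp))]
    have hndt : t.Nodup := (List.nodup_cons.mp hnd).2
    have hfavt : ¬ fav ∈ t := (List.nodup_cons.mp hnd).1
    by_cases hin : fav ∈ langs
    · rw [if_pos hin]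
      rw [ih hndt (acc ++ [fav]) (by
        intro f hf
        simp only [List.mem_append, List.mem_singleton]
        rintro (h | rfl)
        · exact hacc f (by simp [hf]) h
        · exact hfavt hf)]
      simp [hin]
    · rw [if_neg hin]
      rw [ih hndt acc (fun f hf => hacc f (by simp [hf]))]
      simp [hin]

-- Phase 2 (and dict.fromkeys): folding Set.add appends the unseen first occurrences.
lemma add_foldl (t : List String) : ∀ acc : List String,
    t.foldl PySem.Set.add acc = acc ++ (PySem.List.dedup t).filter (fun x => decide (¬ x ∈ acc)) := by
  induction t with
  | nil => simp [PySem.List.dedup_eq_ofList, PySem.Set.ofList, PySem.Set.empty]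
  | cons l t ih =>
    intro acc
    have hded : PySem.List.dedup (l :: t) = l :: (PySem.List.dedup t).filter (fun x => decide (¬ x = l)) := by
      rw [PySem.List.dedup_eq_ofList, PySem.Set.ofList_eq_foldl]
      simp only [List.foldl_cons]
      rw [show PySem.Set.add ([] : List String) l = [l] from by
        simp [PySem.Set.add, PySem.Set.contains]]
      rw [ih [l]]
      simp
    simp only [List.foldl_cons]
    by_cases hmem : l ∈ acc
    · rw [show PySem.Set.add acc l = acc from by
        simp [PySem.Set.add, PySem.Set.contains, hmem]]
      rw [ih acc, hded, List.filter_cons]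
      simp only [hmem, not_true_eq_false, decide_false, Bool.false_eq_true, if_false]
      rw [List.filter_filter]
      refine congrArg (acc ++ ·) (List.filter_congr ?_)
      intro x hx
      by_cases hxa : x ∈ acc
      · simp [hxa]
      · simp [hxa, show x ≠ l from fun e => hxa (e ▸ hmem)]
    · rw [show PySem.Set.add acc l = acc ++ [l] from by
        simp [PySem.Set.add, PySem.Set.contains, hmem]]
      rw [ih (acc ++ [l]), hded, List.filter_cons]
      simp only [hmem, not_false_eq_true, decide_true, if_true]
      rw [List.filter_filter, List.append_assoc, List.singleton_append]
      refine congrArg (acc ++ ·) (congrArg (l :: ·) (List.filter_congr ?_))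
      intro x hx
      by_cases hxl : x = l
      · simp [hxl, hmem]
      · by_cases hxa : x ∈ acc <;> simp [hxl, hxa]

-- An element of a nodup list filtered by equality.
lemma filter_eq_nodup (d : List String) (a : String) (h : d.Nodup) :
    d.filter (fun x => decide (x = a)) = if a ∈ d then [a] else [] := by
  induction d with
  | nil => simp
  | cons x t ih =>
    have hnd := List.nodup_cons.mp h
    by_cases hx : x = a
    · subst hx
      have : t.filter (fun x' => decide (x' = x)) = [] := by
        rw [List.filter_eq_nil_iff]
        intro b hb
        simp only [decide_eq_true_eq]
        rintro rfl
        exact hnd.1 hb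
      simp [this]
    · simp [hx, ih hnd.2, Ne.symm hx]

lemma insertBy_middle {α : Type} (before : α → α → Bool) (x : α) (as bs : List α)
    (ha : ∀ a ∈ as, before x a = false) (hb : ∀ b ∈ bs, before x b = true) :
    PySem.List.insertBy before x (as ++ bs) = as ++ x :: bs := by
  induction as with
  | nil =>
    cases bs with
    | nil => simp [PySem.List.insertBy]
    | cons b t => simp [PySem.List.insertBy, hb b (by simp)]
  | cons a as' ih =>
    have hfa : before x a = false := ha a (by simp)
    have hstep : PySem.List.insertBy before x (a :: (as' ++ bs)) =
        a :: PySem.List.insertBy before x (as' ++ bs) := by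
      cases h : as' ++ bs with
      | nil => simp [PySem.List.insertBy, hfa]
      | cons y ys => simp [PySem.List.insertBy, hfa]
    simp only [List.cons_append, hstep, ih (fun a' ha' => ha a' (by simp [ha']))]

lemma sorted_buckets (key : String → Int) (m : Nat) (hb : ∀ x, 0 ≤ key x ∧ key x < m)
    (xs : List String) : PySem.List.sorted xs key =
      (List.range m).flatMap (fun (i : Nat) => xs.filter (fun x => decide (key x = (i : Int)))) := by
  rw [PySem.List.sorted_eq_foldl_insertBy]
  induction xs using List.reverseRecOn with
  | nil => simp
  | append_singleton xs x ih =>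
    rw [List.foldl_append, List.foldl_cons, List.foldl_nil, ih]
    obtain ⟨hk0, hkm⟩ := hb x
    have hkx : key x = ((key x).toNat : Int) := (Int.toNat_of_nonneg hk0).symm
    set k : Nat := (key x).toNat with hkdef
    have hkm' : k < m := by omega
    have hsplit : List.range m = List.range (k+1) ++ (List.range (m - (k+1))).map (fun j => (k+1) + j) := by
      rw [← List.range_add]; congr 1; omega
    rw [hsplit, List.flatMap_append, List.flatMap_append]
    rw [insertBy_middle _ x _ _
      (by
        intro a haa
        simp only [List.mem_flatMap, List.mem_range, List.mem_filter, decide_eq_true_eq] at haa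
        obtain ⟨i, hi, _, hkey⟩ := haa
        simp only [decide_eq_false_iff_not, not_lt, hkey, hkx]
        exact_mod_cast Nat.lt_succ_iff.mp hi)
      (by
        intro b hbb
        simp only [List.mem_flatMap, List.mem_map, List.mem_range, List.mem_filter, decide_eq_true_eq] at hbb
        obtain ⟨i, ⟨j, hj, rfl⟩, _, hkey⟩ := hbb
        simp only [decide_eq_true_eq, hkey, hkx]
        push_cast; omega)]
    -- now: flatMapLower ++ x :: flatMapUpper = flatMapLower' ++ flatMapUpper'
    have hupper : ((List.range (m - (k+1))).map (fun j => (k+1) + j)).flatMap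
          (fun (i : Nat) => (xs ++ [x]).filter (fun y => decide (key y = (i : Int)))) =
        ((List.range (m - (k+1))).map (fun j => (k+1) + j)).flatMap
          (fun (i : Nat) => xs.filter (fun y => decide (key y = (i : Int)))) := by
      apply List.flatMap_congr
      intro i hi
      simp only [List.mem_map, List.mem_range] at hi
      obtain ⟨j, hj, rfl⟩ := hi
      rw [List.filter_append]
      have hne : ¬ key x = ((k:Int)+1+(j:Int)) := by rw [hkx]; omega
      simp only [List.filter_cons, List.filter_nil]
      rw [if_neg (by simpa using hne)]
      simp
    have hlower : (List.range (k+1)).flatMap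
          (fun (i : Nat) => (xs ++ [x]).filter (fun y => decide (key y = (i : Int)))) =
        ((List.range (k+1)).flatMap (fun (i : Nat) => xs.filter (fun y => decide (key y = (i : Int))))) ++ [x] := by
      rw [List.range_succ, List.flatMap_append, List.flatMap_append]
      have h1 : (List.range k).flatMap (fun (i : Nat) => (xs ++ [x]).filter (fun y => decide (key y = (i : Int)))) =
          (List.range k).flatMap (fun (i : Nat) => xs.filter (fun y => decide (key y = (i : Int)))) := by
        apply List.flatMap_congr
        intro i hi
        simp only [List.mem_range] at hi
        rw [List.filter_append]
        have hne : ¬ key x = (i : Int) := by rw [hkx]; intro e; exact absurd (by exact_mod_cast e) (by omega)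
        simp only [List.filter_cons, List.filter_nil]
        rw [if_neg (by simpa using hne)]
        simp
      have h2 : ([k] : List Nat).flatMap (fun (i : Nat) => (xs ++ [x]).filter (fun y => decide (key y = (i : Int)))) =
          ([k] : List Nat).flatMap (fun (i : Nat) => xs.filter (fun y => decide (key y = (i : Int)))) ++ [x] := by
        simp only [List.flatMap_cons, List.flatMap_nil, List.append_nil]
        rw [List.filter_append]
        simp [← hkx]
      rw [h1, h2, List.append_assoc]
    rw [hupper, hlower, List.append_assoc, List.singleton_append]

lemma filter_mem_lit (d : List String) :
    List.filter (fun f => decide (f ∈ d)) (["en", "en-US", "en-GB", "zh-Hans", "zh-Hant", "zh-CN", "zh-TW"] : List String) =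
      (if "en" ∈ d then ["en"] else []) ++
      ((if "en-US" ∈ d then ["en-US"] else []) ++
      ((if "en-GB" ∈ d then ["en-GB"] else []) ++
      ((if "zh-Hans" ∈ d then ["zh-Hans"] else []) ++
      ((if "zh-Hant" ∈ d then ["zh-Hant"] else []) ++
      ((if "zh-CN" ∈ d then ["zh-CN"] else []) ++
      (if "zh-TW" ∈ d then ["zh-TW"] else [])))))) := by
  simp only [List.filter_cons, List.filter_nil, decide_eq_true_eq]
  split_ifs <;> rfl

set_option maxHeartbeats 1000000 in
lemma main_eq (langs : List String) : collect_language_order langs = collect_language_order_alt langs := by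
  unfold collect_language_order collect_language_order_alt
  dsimp only
  rw [phase1 langs (["en", "en-US", "en-GB", "zh-Hans", "zh-Hant", "zh-CN", "zh-TW"]) (by decide) [] (by simp)]
  rw [List.nil_append]
  rw [show (fun (o : List String) (l : String) => if ¬ l ∈ o then o ++ [l] else o) = PySem.Set.add from by
    funext o l
    simp [PySem.Set.add, PySem.Set.contains, ite_not]]
  rw [add_foldl langs]
  rw [show (fun lang => PySem.Dict.getD pvRankB lang (PySem.List.len pvPriorityB)) = keyB from rfl]
  rw [sorted_buckets keyB 8 keyB_bounds]
  rw [show List.range 8 = [0,1,2,3,4,5,6,7] from by decide]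
  simp only [List.flatMap_cons, List.flatMap_nil, List.append_nil]
  have hnd : (PySem.List.dedup langs).Nodup := PySem.List.nodup_dedup langs
  have hmemd : ∀ x : String, x ∈ PySem.List.dedup langs ↔ x ∈ langs := fun x => PySem.List.mem_dedup langs x
  have hb0 : List.filter (fun x => decide (keyB x = ((0:Nat):Int))) (PySem.List.dedup langs) =
      List.filter (fun x => decide (x = "en")) (PySem.List.dedup langs) := by
    refine List.filter_congr ?_
    intro x _
    rw [keyB_eq]
    split_ifs <;> simp_all
  have hb1 : List.filter (fun x => decide (keyB x = ((1:Nat):Int))) (PySem.List.dedup langs) =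
      List.filter (fun x => decide (x = "en-US")) (PySem.List.dedup langs) := by
    refine List.filter_congr ?_
    intro x _
    rw [keyB_eq]
    split_ifs <;> simp_all
  have hb2 : List.filter (fun x => decide (keyB x = ((2:Nat):Int))) (PySem.List.dedup langs) =
      List.filter (fun x => decide (x = "en-GB")) (PySem.List.dedup langs) := by
    refine List.filter_congr ?_
    intro x _
    rw [keyB_eq]
    split_ifs <;> simp_all
  have hb3 : List.filter (fun x => decide (keyB x = ((3:Nat):Int))) (PySem.List.dedup langs) =
      List.filter (fun x => decide (x = "zh-Hans")) (PySem.List.dedup langs) := by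
    refine List.filter_congr ?_
    intro x _
    rw [keyB_eq]
    split_ifs <;> simp_all
  have hb4 : List.filter (fun x => decide (keyB x = ((4:Nat):Int))) (PySem.List.dedup langs) =
      List.filter (fun x => decide (x = "zh-Hant")) (PySem.List.dedup langs) := by
    refine List.filter_congr ?_
    intro x _
    rw [keyB_eq]
    split_ifs <;> simp_all
  have hb5 : List.filter (fun x => decide (keyB x = ((5:Nat):Int))) (PySem.List.dedup langs) =
      List.filter (fun x => decide (x = "zh-CN")) (PySem.List.dedup langs) := by
    refine List.filter_congr ?_
    intro x _
    rw [keyB_eq]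
    split_ifs <;> simp_all
  have hb6 : List.filter (fun x => decide (keyB x = ((6:Nat):Int))) (PySem.List.dedup langs) =
      List.filter (fun x => decide (x = "zh-TW")) (PySem.List.dedup langs) := by
    refine List.filter_congr ?_
    intro x _
    rw [keyB_eq]
    split_ifs <;> simp_all
  have hb7 : List.filter (fun x => decide (keyB x = ((7:Nat):Int))) (PySem.List.dedup langs) =
      List.filter (fun x => decide (¬ x ∈ (["en", "en-US", "en-GB", "zh-Hans", "zh-Hant", "zh-CN", "zh-TW"] : List String))) (PySem.List.dedup langs) := by
    refine List.filter_congr ?_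
    intro x _
    simp only [decide_eq_decide]
    have := keyB_seven_iff x
    unfold pvPriorityB at this
    simpa using this
  rw [hb0, filter_eq_nodup (PySem.List.dedup langs) "en" hnd]
  rw [hb1, filter_eq_nodup (PySem.List.dedup langs) "en-US" hnd]
  rw [hb2, filter_eq_nodup (PySem.List.dedup langs) "en-GB" hnd]
  rw [hb3, filter_eq_nodup (PySem.List.dedup langs) "zh-Hans" hnd]
  rw [hb4, filter_eq_nodup (PySem.List.dedup langs) "zh-Hant" hnd]
  rw [hb5, filter_eq_nodup (PySem.List.dedup langs) "zh-CN" hnd]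
  rw [hb6, filter_eq_nodup (PySem.List.dedup langs) "zh-TW" hnd]
  rw [hb7]
  have hP : List.filter (fun f => decide (f ∈ langs)) (["en", "en-US", "en-GB", "zh-Hans", "zh-Hant", "zh-CN", "zh-TW"] : List String) =
      List.filter (fun f => decide (f ∈ PySem.List.dedup langs)) (["en", "en-US", "en-GB", "zh-Hans", "zh-Hant", "zh-CN", "zh-TW"] : List String) := by
    refine List.filter_congr ?_
    intro f _
    simp
  have hR : List.filter (fun x => decide (¬ x ∈ List.filter (fun f => decide (f ∈ langs)) (["en", "en-US", "en-GB", "zh-Hans", "zh-Hant", "zh-CN", "zh-TW"] : List String))) (PySem.List.dedup langs) =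
      List.filter (fun x => decide (¬ x ∈ (["en", "en-US", "en-GB", "zh-Hans", "zh-Hant", "zh-CN", "zh-TW"] : List String))) (PySem.List.dedup langs) := by
    refine List.filter_congr ?_
    intro x hx
    have hxl : x ∈ langs := (hmemd x).mp hx
    simp only [decide_eq_decide, List.mem_filter]
    simp [hxl]
  rw [hR, hP]
  have hL := filter_mem_lit (PySem.List.dedup langs)
  rw [hL]
  simp only [List.append_assoc]

-- ===== VERDICT (by name: the statement is the Claim_ definition above) =====
theorem collect_language_order_spec : Claim_equal_collect_language_order := by
  intro langs _
  unfold Spec_collect_language_order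
  exact main_eq langs
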